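-- pv_equiv track=rewrite | github.com/Mapet13/Studia | ćwiczenia 5/Na Zajęciach/01.py | skroc
-- ===== SOURCE A (Python) =====
-- def skroc(u):
--     def nwd(a, b):
--         a = abs(a)
--         b = abs(b)
--         while a*b != 0:
--             if a >= b: a %= b
--             if a == 0: break
--             if b >= a: b %= a
--             if b == 0: break
--         return a+b
--     # end
--
--     r = nwd(u[0], u[1])
--     return (u[0] // r, u[1] // r)
-- ===== SOURCE B (Python) =====
-- def skroc(u):
--     def nwd(a, b):
--         a = abs(a)
--         b = abs(b)
--         if b == 0:
--             return a
--         return nwd(b, a % b)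
--     r = nwd(u[0], u[1])
--     return (u[0] // r, u[1] // r)
-- ===== Notes on version B (the rewrite author's own statement) =====
-- stated objective: simpler
-- what changed: Replaced A's iterative two-branch while-loop gcd (alternating a %= b / b %= a with break checks, returning a+b) by a standard recursive Euclidean gcd with a single modulo per step.
import Mathlib
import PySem

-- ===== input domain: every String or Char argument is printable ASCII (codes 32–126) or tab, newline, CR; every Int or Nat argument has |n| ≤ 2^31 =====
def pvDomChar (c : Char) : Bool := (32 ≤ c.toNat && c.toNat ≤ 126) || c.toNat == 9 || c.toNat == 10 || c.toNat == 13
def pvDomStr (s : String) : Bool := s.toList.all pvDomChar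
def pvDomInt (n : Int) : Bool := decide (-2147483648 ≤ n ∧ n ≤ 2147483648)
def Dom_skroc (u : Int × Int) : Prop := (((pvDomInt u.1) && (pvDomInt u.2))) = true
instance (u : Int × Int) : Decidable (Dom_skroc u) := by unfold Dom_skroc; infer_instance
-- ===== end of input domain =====

-- B replaces A's iterative two-branch while-loop gcd by a standard recursive Euclidean gcd (objective: simpler).

-- ===== PORT A =====
-- A's while-loop over (a, b); after Python's `abs` both loop values are nonnegative,
-- so the loop state is carried as Nat (Python's % on nonnegative ints = Nat.mod, exact here).
def nwdLoopA (a b : Nat) : Nat :=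
  if a * b = 0 then a + b            -- while a*b != 0 … return a+b
  else
    let a' := if b ≤ a then a % b else a     -- if a >= b: a %= b
    if a' = 0 then a' + b                    -- if a == 0: break
    else
      let b' := if a' ≤ b then b % a' else b -- if b >= a: b %= a
      if b' = 0 then a' + b'                 -- if b == 0: break
      else nwdLoopA a' b'
termination_by a + b
decreasing_by
  rename_i hab ha hb
  have hb0 : b ≠ 0 := by rintro rfl; simp at hab
  have ha0 : a ≠ 0 := by rintro rfl; simp at hab
  have m1 : a % b < b := Nat.mod_lt a (Nat.pos_of_ne_zero hb0)
  simp only [a', b'] at *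
  split_ifs at * with h1 h2
  · have := Nat.mod_lt b (Nat.pos_of_ne_zero ha)
    omega
  · omega
  · have := Nat.mod_lt b (Nat.pos_of_ne_zero ha0)
    omega
  · omega

def skroc (u : Int × Int) : Int × Int :=
  let r : Int := (nwdLoopA u.1.natAbs u.2.natAbs : Nat)   -- r = nwd(u[0], u[1])
  (PySem.Int.floordiv u.1 r, PySem.Int.floordiv u.2 r)    -- (u[0] // r, u[1] // r)

-- ===== PORT B =====
-- B's recursive Euclid: abs of both arguments, then `a if b == 0 else nwd(b, a % b)`,
-- carried as Nat (both values stay nonnegative; Python's % on nonnegative ints = Nat.mod).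
def nwdB (a b : Nat) : Nat :=
  if b = 0 then a else nwdB b (a % b)
termination_by b
decreasing_by exact Nat.mod_lt a (Nat.pos_of_ne_zero (by assumption))

def skroc_alt (u : Int × Int) : Int × Int :=
  let r : Int := (nwdB u.1.natAbs u.2.natAbs : Nat)
  (PySem.Int.floordiv u.1 r, PySem.Int.floordiv u.2 r)

-- ===== PRECONDITION & SPEC =====
-- Pre_ excludes only u = (0, 0): there the gcd is 0 and both A and B raise ZeroDivisionError.
def Pre_skroc (u : Int × Int) : Prop := ¬ (u.1 = 0 ∧ u.2 = 0)
instance (u : Int × Int) : Decidable (Pre_skroc u) := by unfold Pre_skroc; infer_instance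
def pvWitness_skroc : (Int × Int) := (6, -4)

def Spec_skroc (u : Int × Int) (out : Int × Int) : Prop := out = skroc_alt u
instance (u : Int × Int) (out : Int × Int) : Decidable (Spec_skroc u out) := by unfold Spec_skroc; infer_instance

-- ===== CLAIM (what is proved, stated in full; the proofs are below) =====
def Claim_equal_skroc : Prop := ∀ (u : Int × Int), Dom_skroc u → Pre_skroc u → Spec_skroc u (skroc u)

-- ===== LEMMAS AND PROOFS =====
theorem nwdB_eq_gcd (a b : Nat) : nwdB a b = Nat.gcd a b := by
  induction a, b using nwdB.induct with
  | case1 a => simp [nwdB]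
  | case2 a b hb ih =>
      rw [nwdB, if_neg hb, ih, Nat.gcd_comm a b, Nat.gcd_rec b a, Nat.gcd_comm]

theorem nwdLoopA_eq_gcd : ∀ (n a b : Nat), a + b ≤ n → nwdLoopA a b = Nat.gcd a b := by
  intro n
  induction n with
  | zero =>
    intro a b h
    have h1 : a = 0 ∧ b = 0 := by omega
    simp [h1.1, h1.2, nwdLoopA]
  | succ n ih =>
    intro a b hn
    rw [nwdLoopA]
    by_cases hab : a * b = 0
    · rw [if_pos hab]
      rcases Nat.mul_eq_zero.mp hab with h | h <;> subst h <;> simp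
    rw [if_neg hab]
    have hb0 : b ≠ 0 := by rintro rfl; simp at hab
    have ha0 : a ≠ 0 := by rintro rfl; simp at hab
    have m1 : a % b < b := Nat.mod_lt a (Nat.pos_of_ne_zero hb0)
    by_cases h1 : b ≤ a
    · simp only [h1, if_true]
      by_cases ha : a % b = 0
      · rw [if_pos ha, ha, Nat.zero_add, Nat.gcd_comm, Nat.gcd_rec, ha, Nat.gcd_zero_left]
      · rw [if_neg ha, if_pos (le_of_lt m1)]
        have m2 : b % (a % b) < a % b := Nat.mod_lt b (Nat.pos_of_ne_zero ha)
        by_cases hb : b % (a % b) = 0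
        · rw [if_pos hb, hb, Nat.add_zero, Nat.gcd_comm, Nat.gcd_rec, Nat.gcd_rec, hb,
            Nat.gcd_zero_left]
        · rw [if_neg hb, ih _ _ (by omega)]
          conv_rhs => rw [Nat.gcd_comm, Nat.gcd_rec, Nat.gcd_rec]
          exact Nat.gcd_comm _ _
    · simp only [h1, if_false]
      rw [if_neg ha0, if_pos (le_of_not_ge h1)]
      have m2 : b % a < a := Nat.mod_lt b (Nat.pos_of_ne_zero ha0)
      by_cases hb : b % a = 0
      · rw [if_pos hb, hb, Nat.add_zero, Nat.gcd_rec, hb, Nat.gcd_zero_left]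
      · rw [if_neg hb, ih _ _ (by omega)]
        conv_rhs => rw [Nat.gcd_rec]
        exact Nat.gcd_comm _ _

-- ===== VERDICT (by name: the statement is the Claim_ definition above) =====
theorem skroc_spec : Claim_equal_skroc := by
  intro u _ _
  unfold Spec_skroc skroc skroc_alt
  rw [nwdLoopA_eq_gcd (u.1.natAbs + u.2.natAbs) _ _ le_rfl, nwdB_eq_gcd]
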